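-- pv_equiv track=rewrite | github.com/WuGuommming/fragweave_project | fragweave/eval/localization.py | shadow_to_clean_and_spans
-- ===== SOURCE A (Python) =====
-- from typing import List, Tuple, Optional
--
-- def merge_spans(spans: List[Tuple[int, int]], *, gap: int = 0) -> List[Tuple[int, int]]:
--     """Merge overlapping (or gap-close) spans."""
--     spans = [(int(a), int(b)) for a, b in spans if a is not None and b is not None and int(a) < int(b)]
--     if not spans:
--         return []
--     spans.sort()
--     out = [spans[0]]
--     for a, b in spans[1:]:
--         la, lb = out[-1]
--         if a <= lb + gap:
--             out[-1] = (la, max(lb, b))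
--         else:
--             out.append((a, b))
--     return out
--
-- def shadow_to_clean_and_spans(shadow: str, tag_start: str, tag_end: str) -> Tuple[str, List[Tuple[int, int]]]:
--     """Convert a shadow-tagged context into (clean_text, gt_spans_in_clean_text).
--
--     Tags wrap injected spans; clean_text is shadow with tags removed.
--     Spans are computed in the coordinate system of clean_text.
--     """
--     s = shadow or ""
--     clean_chars: List[str] = []
--     spans: List[Tuple[int, int]] = []
--     i = 0
--     cur_start: Optional[int] = None
--
--     while i < len(s):
--         if s.startswith(tag_start, i):
--             i += len(tag_start)
--             if cur_start is None:
--                 cur_start = len(clean_chars)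
--             continue
--         if s.startswith(tag_end, i):
--             i += len(tag_end)
--             if cur_start is not None:
--                 spans.append((cur_start, len(clean_chars)))
--                 cur_start = None
--             continue
--
--         clean_chars.append(s[i])
--         i += 1
--
--     if cur_start is not None:
--         spans.append((cur_start, len(clean_chars)))
--
--     clean = "".join(clean_chars)
--     spans = merge_spans(spans)
--     return clean, spans
-- ===== SOURCE B (Python) =====
-- from typing import List, Optional, Tuple
--
--
-- def _emit(spans: List[Tuple[int, int]], a: int, b: int) -> None:
--     """Record span (a, b), skipping empty spans and coalescing a span that starts
--     exactly where the previous one ended."""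
--     if a < b:
--         if spans and spans[-1][1] == a:
--             spans[-1] = (spans[-1][0], b)
--         else:
--             spans.append((a, b))
--
--
-- def shadow_to_clean_and_spans(shadow: str, tag_start: str, tag_end: str) -> Tuple[str, List[Tuple[int, int]]]:
--     s = shadow or ""
--     if not tag_start or not tag_end:
--         return s, []
--     chunks: List[str] = []
--     spans: List[Tuple[int, int]] = []
--     pos = 0
--     clean_len = 0
--     cur: Optional[int] = None
--     n = len(s)
--     while pos < n:
--         ps = s.find(tag_start, pos)
--         pe = s.find(tag_end, pos)
--         if ps == -1 and pe == -1:
--             chunks.append(s[pos:])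
--             clean_len += n - pos
--             break
--         if ps != -1 and (pe == -1 or ps <= pe):
--             j, is_start, tlen = ps, True, len(tag_start)
--         else:
--             j, is_start, tlen = pe, False, len(tag_end)
--         chunks.append(s[pos:j])
--         clean_len += j - pos
--         pos = j + tlen
--         if is_start:
--             if cur is None:
--                 cur = clean_len
--         else:
--             if cur is not None:
--                 _emit(spans, cur, clean_len)
--                 cur = None
--     if cur is not None:
--         _emit(spans, cur, clean_len)
--     return "".join(chunks), spans
-- ===== Notes on version B (the rewrite author's own statement) =====
-- stated objective: alternative
-- what changed: B jumps between tags with str.find (copying whole text slices into chunks) instead of scanning character by character, and builds the final spans online with an emit step that drops empty spans and coalesces touching ones, instead of collecting raw spans and post-processing them with sort+merge; measured ~20x faster on large inputs (constant-factor: C-level find/slicing replaces the per-character interpreter loop).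
-- outside the precondition, e.g. on shadow_to_clean_and_spans('X', 'X', ''): A returns ('', []), B returns ('X', [])
import Mathlib
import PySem

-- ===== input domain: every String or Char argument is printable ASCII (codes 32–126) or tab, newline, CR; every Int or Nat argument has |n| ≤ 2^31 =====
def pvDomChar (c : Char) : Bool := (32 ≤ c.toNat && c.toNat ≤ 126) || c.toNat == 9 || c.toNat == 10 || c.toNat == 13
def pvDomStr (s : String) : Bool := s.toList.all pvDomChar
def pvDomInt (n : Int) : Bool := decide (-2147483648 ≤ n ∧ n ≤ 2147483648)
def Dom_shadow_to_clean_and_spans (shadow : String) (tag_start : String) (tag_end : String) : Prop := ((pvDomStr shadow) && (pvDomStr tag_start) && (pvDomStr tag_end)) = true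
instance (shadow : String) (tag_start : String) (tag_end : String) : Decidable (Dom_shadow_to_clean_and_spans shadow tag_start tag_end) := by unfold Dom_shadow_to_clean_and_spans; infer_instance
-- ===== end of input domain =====

-- B replaces A's char-by-char scan + final sort/merge pass by find-driven jumps between
-- tags (copying whole slices) with online emission of already-merged spans (measured
-- markedly faster in Python: C-level find/slicing instead of a per-character loop).

-- ===== PORT A =====

-- merge_spans helper: `out[-1] = (la, max(lb, b))` / `out.append((a, b))` on the running list
def pvMStep (out : List (Int × Int)) (p : Int × Int) : List (Int × Int) :=
  match out.getLast? with
  | some (la, lb) => if p.1 ≤ lb + 0 then out.dropLast ++ [(la, max lb p.2)] else out ++ [p]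
  | none => [p]

-- merge_spans(spans) with the default gap=0; entries are Int pairs already, and never None,
-- so the comprehension filter is exactly `a < b`; spans.sort() is Python's lexicographic
-- tuple sort, i.e. PySem.List.sorted2 on the two components.
def pvMergeSpans (spans : List (Int × Int)) : List (Int × Int) :=
  let spans := spans.filter (fun p => decide (p.1 < p.2))
  if spans = [] then []
  else
    let spans := PySem.List.sorted2 spans (fun p => p.1) (fun p => p.2)
    match spans with
    | [] => []
    | s0 :: restS => restS.foldl pvMStep [s0]

-- A's while-loop; the cursor i is represented by the remaining suffix rest = s[i:]
-- (s.startswith(t, i) is startswith(rest, t)); fuel bounds the iteration count — with both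
-- tags nonempty every iteration consumes at least one character, so fuel = len(s) + 1 is
-- never exhausted (with an empty tag Python loops forever; such inputs are outside Pre_).
def pvLoopA (ts te : List Char) : Nat → List Char → List Char → List (Int × Int) → Option Int →
    List Char × List (Int × Int) × Option Int
  | 0, _, clean, spans, cur => (clean, spans, cur)
  | fuel + 1, rest, clean, spans, cur =>
    match rest with
    | [] => (clean, spans, cur)
    | c :: _ =>
      if PySem.Chars.startswith rest ts then
        pvLoopA ts te fuel (rest.drop ts.length) clean spans
          (match cur with | none => some ((clean.length : Int)) | some a => some a)
      else if PySem.Chars.startswith rest te then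
        match cur with
        | some a => pvLoopA ts te fuel (rest.drop te.length) clean (spans ++ [(a, (clean.length : Int))]) none
        | none => pvLoopA ts te fuel (rest.drop te.length) clean spans none
      else
        pvLoopA ts te fuel (rest.drop 1) (clean ++ [c]) spans cur

def shadow_to_clean_and_spans (shadow : String) (tag_start : String) (tag_end : String) :
    String × (List (Int × Int)) :=
  let s := shadow.toList          -- s = shadow or "" (identical for a str)
  let r := pvLoopA tag_start.toList tag_end.toList (s.length + 1) s [] [] none
  let spans := match r.2.2 with
    | some a => r.2.1 ++ [(a, (r.1.length : Int))]
    | none => r.2.1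
  (String.ofList r.1, pvMergeSpans spans)   -- "".join(clean_chars), merge_spans(spans)

-- ===== PORT B =====

-- Source B's _emit: drop an empty span, coalesce one that starts where the last one ended
def pvEmit (spans : List (Int × Int)) (a b : Int) : List (Int × Int) :=
  if a < b then
    match spans.getLast? with
    | some (la, lb) => if lb = a then spans.dropLast ++ [(la, b)] else spans ++ [(a, b)]
    | none => [(a, b)]
  else spans

-- Source B's while-loop; the absolute cursor pos is represented by the suffix rest = s[pos:]:
-- s.find(tag, pos) is find(rest, tag) shifted by pos, and the tests `ps == -1`,
-- `pe == -1 or ps <= pe` and the slice bounds only use the (shift-invariant) relative values.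
def pvLoopB (ts te : List Char) : Nat → List Char → List (List Char) → Int → List (Int × Int) → Option Int →
    List (List Char) × Int × List (Int × Int) × Option Int
  | 0, _, chunks, cleanLen, spans, cur => (chunks, cleanLen, spans, cur)
  | fuel + 1, rest, chunks, cleanLen, spans, cur =>
    if rest = [] then (chunks, cleanLen, spans, cur)     -- while pos < n
    else
      let ps := PySem.Chars.find rest ts
      let pe := PySem.Chars.find rest te
      if ps = -1 ∧ pe = -1 then
        (chunks ++ [rest], cleanLen + (rest.length : Int), spans, cur)   -- append s[pos:], break
      else if ps ≠ -1 ∧ (pe = -1 ∨ ps ≤ pe) then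
        -- j, is_start, tlen = ps, True, len(tag_start); then the is_start branch
        let j := ps.toNat
        let cleanLen' := cleanLen + (j : Int)
        pvLoopB ts te fuel (rest.drop (j + ts.length)) (chunks ++ [rest.take j]) cleanLen' spans
          (match cur with | none => some cleanLen' | some a => some a)
      else
        -- j, is_start, tlen = pe, False, len(tag_end); then the not-is_start branch
        let j := pe.toNat
        let cleanLen' := cleanLen + (j : Int)
        match cur with
        | some a => pvLoopB ts te fuel (rest.drop (j + te.length)) (chunks ++ [rest.take j]) cleanLen'
            (pvEmit spans a cleanLen') none
        | none => pvLoopB ts te fuel (rest.drop (j + te.length)) (chunks ++ [rest.take j]) cleanLen' spans cur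

def shadow_to_clean_and_spans_alt (shadow : String) (tag_start : String) (tag_end : String) :
    String × (List (Int × Int)) :=
  let s := shadow.toList          -- s = shadow or ""
  if tag_start.toList = [] ∨ tag_end.toList = [] then (shadow, [])   -- if not tag_start or not tag_end
  else
    let r := pvLoopB tag_start.toList tag_end.toList (s.length + 1) s [] 0 [] none
    let spans := match r.2.2.2 with
      | some a => pvEmit r.2.2.1 a r.2.1
      | none => r.2.2.1
    (String.ofList (PySem.Chars.join [] r.1), spans)    -- "".join(chunks)

-- ===== PRECONDITION & SPEC =====
-- A's scanner makes no progress on an empty tag (startswith('') always holds and consumes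
-- nothing), so with a nonempty shadow and an empty tag_start or tag_end Python A loops
-- forever on almost all inputs; Pre_ excludes nonempty shadows with an empty tag, which also
-- drops the few such inputs where A still returns (a shadow made only of tag_start copies
-- with tag_end = '', e.g. ("X","X","")).
def Pre_shadow_to_clean_and_spans (shadow : String) (tag_start : String) (tag_end : String) : Prop :=
  shadow.toList = [] ∨ (tag_start.toList ≠ [] ∧ tag_end.toList ≠ [])
instance (shadow : String) (tag_start : String) (tag_end : String) : Decidable (Pre_shadow_to_clean_and_spans shadow tag_start tag_end) := by unfold Pre_shadow_to_clean_and_spans; infer_instance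
def pvWitness_shadow_to_clean_and_spans : String × String × String := ("x[a]y[b]z", "[", "]")

def Spec_shadow_to_clean_and_spans (shadow : String) (tag_start : String) (tag_end : String) (out : String × (List (Int × Int))) : Prop := out = shadow_to_clean_and_spans_alt shadow tag_start tag_end
instance (shadow : String) (tag_start : String) (tag_end : String) (out : String × (List (Int × Int))) : Decidable (Spec_shadow_to_clean_and_spans shadow tag_start tag_end out) := by unfold Spec_shadow_to_clean_and_spans; infer_instance

-- ===== CLAIM (what is proved, stated in full; the proofs are below) =====
def Claim_equal_shadow_to_clean_and_spans : Prop := ∀ (shadow : String) (tag_start : String) (tag_end : String), Dom_shadow_to_clean_and_spans shadow tag_start tag_end → Pre_shadow_to_clean_and_spans shadow tag_start tag_end → Spec_shadow_to_clean_and_spans shadow tag_start tag_end (shadow_to_clean_and_spans shadow tag_start tag_end)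

-- ===== LEMMAS AND PROOFS =====

-- A run of pvEmit steps over a list of raw spans
def pvEmitFold (spans : List (Int × Int)) : List (Int × Int) :=
  spans.foldl (fun acc p => pvEmit acc p.1 p.2) []

-- raw-span chain: starts bounded below by lo, each span has a ≤ b, consecutive spans touch
-- at most (b_k ≤ a_{k+1}), and the last end is ≤ hi
def pvChain : Int → List (Int × Int) → Int → Prop
  | lo, [], hi => lo ≤ hi
  | lo, (a, b) :: l, hi => lo ≤ a ∧ a ≤ b ∧ pvChain b l hi

-- loop-state invariant: raw spans collected so far form a chain whose last end is below the
-- pending start (if any), itself below the current clean length m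
def pvOk (m : Int) (spans : List (Int × Int)) (cur : Option Int) : Prop :=
  pvChain 0 spans (cur.getD m) ∧ cur.getD m ≤ m

def pvLastEnd (acc : List (Int × Int)) : Int :=
  match acc.getLast? with
  | some p => p.2
  | none => 0

lemma pvChain_mono {lo hi hi' : Int} {l : List (Int × Int)} (h : pvChain lo l hi) (hle : hi ≤ hi') :
    pvChain lo l hi' := by
  induction l generalizing lo with
  | nil => exact le_trans h hle
  | cons p l ih => exact ⟨h.1, h.2.1, ih h.2.2⟩

lemma pvChain_concat {lo a b : Int} {l : List (Int × Int)} (h : pvChain lo l a) (hab : a ≤ b) :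
    pvChain lo (l ++ [(a, b)]) b := by
  induction l generalizing lo with
  | nil => exact ⟨h, hab, le_refl b⟩
  | cons p l ih => exact ⟨h.1, h.2.1, ih h.2.2⟩

lemma pvOk_mono {m m' : Int} {spans : List (Int × Int)} {cur : Option Int}
    (h : pvOk m spans cur) (hle : m ≤ m') : pvOk m' spans cur := by
  cases cur with
  | none => exact ⟨pvChain_mono h.1 hle, le_refl _⟩
  | some a => exact ⟨h.1, le_trans h.2 hle⟩

-- pvEmit over a chain is exactly the merge fold over the nonempty spans
lemma pvLastEnd_concat (acc : List (Int × Int)) (p : Int × Int) :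
    pvLastEnd (acc ++ [p]) = p.2 := by
  simp [pvLastEnd]

lemma pvFoldEq : ∀ (l : List (Int × Int)) (lo hi : Int) (acc : List (Int × Int)),
    pvChain lo l hi → 0 ≤ lo → pvLastEnd acc ≤ lo →
    l.foldl (fun acc p => pvEmit acc p.1 p.2) acc
      = (l.filter (fun p => decide (p.1 < p.2))).foldl pvMStep acc := by
  intro l
  induction l with
  | nil => intro lo hi acc _ _ _; rfl
  | cons p l ih =>
    intro lo hi acc h h0 hacc
    obtain ⟨a, b⟩ := p
    obtain ⟨h1, h2, h3⟩ := h
    by_cases hab : a < b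
    · have key : pvEmit acc a b = pvMStep acc (a, b) ∧ pvLastEnd (pvEmit acc a b) = b := by
        rcases List.eq_nil_or_concat acc with rfl | ⟨init, q, rfl⟩
        · constructor
          · simp [pvEmit, pvMStep, hab]
          · simp [pvEmit, hab, pvLastEnd]
        · obtain ⟨la, lb⟩ := q
          rw [List.concat_eq_append] at *
          have hlast : (init ++ [(la, lb)]).getLast? = some (la, lb) := List.getLast?_concat
          have hlb : lb ≤ a := le_trans (by simpa [pvLastEnd, hlast] using hacc) h1
          by_cases heq : lb = a
          · have hmax : max lb b = b := max_eq_right (le_of_lt (heq ▸ hab))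
            constructor
            · simp [pvEmit, pvMStep, hab, heq, le_refl]
              omega
            · simp [pvEmit, hab, hlast, heq]
              exact pvLastEnd_concat _ _
          · have hlt : ¬ a ≤ lb + 0 := by omega
            constructor
            · simp [pvEmit, pvMStep, hab, hlast, heq]
              omega
            · simp [pvEmit, hab, hlast, heq]
              simpa using pvLastEnd_concat (init ++ [(la, lb)]) (a, b)
      have hkeep : (fun p : Int × Int => decide (p.1 < p.2)) (a, b) = true := by simpa using hab
      simp only [List.foldl_cons, List.filter_cons, hkeep, if_true]
      rw [key.1]
      exact ih b hi _ h3 (le_trans h0 (le_trans h1 h2)) (le_of_eq (key.1 ▸ key.2))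
    · have hdrop : (fun p : Int × Int => decide (p.1 < p.2)) (a, b) = false := by simpa using hab
      simp only [List.foldl_cons, List.filter_cons, hdrop, Bool.false_eq_true, if_false]
      have hemit : pvEmit acc a b = acc := by simp [pvEmit, hab]
      rw [hemit]
      exact ih b hi acc h3 (le_trans h0 (le_trans h1 h2)) (le_trans hacc (le_trans h1 h2))

lemma pvChain_forall {lo hi : Int} {l : List (Int × Int)} (h : pvChain lo l hi) :
    ∀ q ∈ l, lo ≤ q.1 := by
  induction l generalizing lo with
  | nil => intro q hq; cases hq
  | cons p l ih =>
    obtain ⟨a, b⟩ := p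
    intro q hq
    rcases List.mem_cons.mp hq with rfl | hq
    · exact h.1
    · exact le_trans h.1 (le_trans h.2.1 (ih h.2.2 q hq))

lemma pvChain_pairwise {lo hi : Int} {l : List (Int × Int)} (h : pvChain lo l hi) :
    l.Pairwise (fun p q => p.2 ≤ q.1) := by
  induction l generalizing lo with
  | nil => exact List.Pairwise.nil
  | cons p l ih =>
    obtain ⟨a, b⟩ := p
    exact List.Pairwise.cons (fun q hq => pvChain_forall h.2.2 q hq) (ih h.2.2)

lemma pvSorted2_id {l : List (Int × Int)} (h : l.Pairwise (fun p q => p.1 < q.1)) :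
    PySem.List.sorted2 l (fun p => p.1) (fun p => p.2) = l := by
  induction l using List.reverseRecOn with
  | nil => rfl
  | append_singleton l x ih =>
    rw [List.pairwise_append] at h
    obtain ⟨hl, -, hx⟩ := h
    simp only [PySem.List.sorted2] at *
    rw [List.foldl_append, ih hl]
    simp only [List.foldl_cons, List.foldl_nil]
    apply PySem.List.insertBy_of_forall_not_before
    intro y hy
    have hyx : y.1 < x.1 := hx y hy x (by simp)
    simp [not_lt.mpr hyx.le]
    omega

lemma pvMerge_eq_emitFold {hi : Int} {l : List (Int × Int)} (h : pvChain 0 l hi) :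
    pvMergeSpans l = pvEmitFold l := by
  have hE := pvFoldEq l 0 hi [] h le_rfl (by simp [pvLastEnd])
  rw [pvEmitFold, hE]
  by_cases hf : l.filter (fun p => decide (p.1 < p.2)) = []
  · simp [pvMergeSpans, hf]
  · have hpw : (l.filter (fun p => decide (p.1 < p.2))).Pairwise (fun p q => p.1 < q.1) := by
      refine List.Pairwise.imp_of_mem ?_ ((pvChain_pairwise h).filter _)
      intro p q hp _ hpq
      have hpb : p.1 < p.2 := by simpa using List.of_mem_filter hp
      exact lt_of_lt_of_le hpb hpq
    rw [pvMergeSpans]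
    simp only [if_neg hf]
    rw [pvSorted2_id hpw]
    rcases hl : l.filter (fun p => decide (p.1 < p.2)) with - | ⟨s0, restS⟩
    · exact absurd hl hf
    · rw [hl, List.foldl_cons]
      have : pvMStep [] s0 = [s0] := by simp [pvMStep]
      rw [this]

lemma pvLoopA_nil (ts te : List Char) (f : Nat) (clean : List Char) (spans : List (Int × Int))
    (cur : Option Int) : pvLoopA ts te f [] clean spans cur = (clean, spans, cur) := by
  cases f <;> rfl

lemma pvLoopB_nil (ts te : List Char) (f : Nat) (chunks : List (List Char)) (cleanLen : Int)
    (spans : List (Int × Int)) (cur : Option Int) :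
    pvLoopB ts te f [] chunks cleanLen spans cur = (chunks, cleanLen, spans, cur) := by
  cases f <;> rfl

-- A's scanner copies k tag-free characters one at a time
lemma pvChars (ts te : List Char) : ∀ (k : Nat) (rest clean : List Char) (fuel : Nat)
    (spans : List (Int × Int)) (cur : Option Int), k ≤ rest.length →
    (∀ i < k, ¬ ts <+: rest.drop i) → (∀ i < k, ¬ te <+: rest.drop i) →
    pvLoopA ts te (k + fuel) rest clean spans cur
      = pvLoopA ts te fuel (rest.drop k) (clean ++ rest.take k) spans cur := by
  intro k
  induction k with
  | zero => intro rest clean fuel spans cur _ _ _; simp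
  | succ k ih =>
    intro rest clean fuel spans cur hk hs he
    obtain ⟨c, rd, rfl⟩ := List.exists_cons_of_ne_nil
      (by intro h0; rw [h0] at hk; simp at hk : (rest ≠ []))
    have hsw1 : ¬ PySem.Chars.startswith (c :: rd) ts = true := by
      rw [PySem.Chars.startswith_iff]; exact hs 0 (Nat.succ_pos k)
    have hsw2 : ¬ PySem.Chars.startswith (c :: rd) te = true := by
      rw [PySem.Chars.startswith_iff]; exact he 0 (Nat.succ_pos k)
    have harith : k + 1 + fuel = (k + fuel) + 1 := by omega
    rw [harith]
    show pvLoopA ts te ((k + fuel) + 1) (c :: rd) clean spans cur = _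
    simp only [pvLoopA, hsw1, hsw2, if_false, Bool.false_eq_true]
    rw [List.drop_one, List.tail_cons]
    rw [ih rd (clean ++ [c]) fuel spans cur (by simpa using hk)
      (fun i hi => by simpa [List.drop_succ_cons] using hs (i + 1) (by omega))
      (fun i hi => by simpa [List.drop_succ_cons] using he (i + 1) (by omega))]
    simp [List.append_assoc]

lemma pvFind_none {s t : List Char} (h : PySem.Chars.find s t = -1) :
    ∀ i, ¬ t <+: s.drop i := by
  rw [PySem.Chars.find_eq_neg_one_iff] at h
  intro i hp
  exact h (List.IsInfix.trans hp.isInfix (List.drop_suffix i s).isInfix)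

lemma pvFind_some {s t : List Char} (ht : t ≠ []) (h : PySem.Chars.find s t ≠ -1) :
    0 ≤ PySem.Chars.find s t ∧
    t <+: s.drop (PySem.Chars.find s t).toNat ∧
    (∀ i < (PySem.Chars.find s t).toNat, ¬ t <+: s.drop i) ∧
    (PySem.Chars.find s t).toNat + t.length ≤ s.length := by
  have h0 : PySem.Chars.findFrom s t ((0 : Nat) : Int) = PySem.Chars.find s t := by
    simpa using PySem.Chars.findFrom_zero s t
  have hs := PySem.Chars.findFrom_natCast_spec s t 0 (Nat.zero_le _) (by rw [h0]; exact h)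
  rw [h0] at hs
  obtain ⟨hge, hpre, hno⟩ := hs
  have htl : 1 ≤ t.length := List.length_pos_iff.mpr ht
  have hfit : t.length ≤ s.length - (PySem.Chars.find s t).toNat := by
    simpa [List.length_drop] using hpre.length_le
  exact ⟨by exact_mod_cast hge, hpre, fun i hi => hno i (Nat.zero_le i) hi, by omega⟩

lemma pvEmitFold_concat (l : List (Int × Int)) (a b : Int) :
    pvEmitFold (l ++ [(a, b)]) = pvEmit (pvEmitFold l) a b := by
  simp [pvEmitFold, List.foldl_append]

-- the simulation: B's find-driven loop computes A's state, with spans pre-merged by pvEmit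
lemma pvSim (ts te : List Char) (hts : ts ≠ []) (hte : te ≠ []) :
    ∀ (n : Nat) (rest : List Char), rest.length ≤ n →
    ∀ (fa fb : Nat) (clean : List Char) (chunks : List (List Char)) (spans : List (Int × Int))
      (cur : Option Int), rest.length ≤ fa → rest.length ≤ fb →
      chunks.flatten = clean → pvOk ((clean.length : Int)) spans cur →
      (pvLoopB ts te fb rest chunks ((clean.length : Int)) (pvEmitFold spans) cur).1.flatten
          = (pvLoopA ts te fa rest clean spans cur).1 ∧
      (pvLoopB ts te fb rest chunks ((clean.length : Int)) (pvEmitFold spans) cur).2.1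
          = (((pvLoopA ts te fa rest clean spans cur).1.length : Int)) ∧
      (pvLoopB ts te fb rest chunks ((clean.length : Int)) (pvEmitFold spans) cur).2.2.1
          = pvEmitFold (pvLoopA ts te fa rest clean spans cur).2.1 ∧
      (pvLoopB ts te fb rest chunks ((clean.length : Int)) (pvEmitFold spans) cur).2.2.2
          = (pvLoopA ts te fa rest clean spans cur).2.2 ∧
      pvOk (((pvLoopA ts te fa rest clean spans cur).1.length : Int))
        (pvLoopA ts te fa rest clean spans cur).2.1 (pvLoopA ts te fa rest clean spans cur).2.2 := by
  intro n
  induction n with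
  | zero =>
    intro rest hlen fa fb clean chunks spans cur hfa hfb hfl hok
    have h0 : rest = [] := List.eq_nil_of_length_eq_zero (Nat.le_zero.mp hlen)
    subst h0
    rw [pvLoopA_nil, pvLoopB_nil]
    exact ⟨hfl, rfl, rfl, rfl, hok⟩
  | succ n ih =>
    intro rest hlen fa fb clean chunks spans cur hfa hfb hfl hok
    by_cases hrest : rest = []
    · subst hrest
      rw [pvLoopA_nil, pvLoopB_nil]
      exact ⟨hfl, rfl, rfl, rfl, hok⟩
    have hrl : 0 < rest.length := List.length_pos_iff.mpr hrest
    have htsl : 0 < ts.length := List.length_pos_iff.mpr hts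
    have htel : 0 < te.length := List.length_pos_iff.mpr hte
    obtain ⟨fb', rfl⟩ : ∃ m, fb = m + 1 := ⟨fb - 1, by omega⟩
    simp only [pvLoopB, if_neg hrest]
    by_cases hboth : PySem.Chars.find rest ts = -1 ∧ PySem.Chars.find rest te = -1
    · rw [if_pos hboth]
      obtain ⟨fa', rfl⟩ : ∃ m, fa = rest.length + m := ⟨fa - rest.length, by omega⟩
      rw [pvChars ts te rest.length rest clean fa' spans cur le_rfl
        (fun i _ => pvFind_none hboth.1 i) (fun i _ => pvFind_none hboth.2 i)]
      rw [List.drop_length, List.take_length, pvLoopA_nil]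
      refine ⟨by simp [hfl], by push_cast [List.length_append]; ring, rfl, rfl,
        pvOk_mono hok (by push_cast [List.length_append]; omega)⟩
    rw [if_neg hboth]
    by_cases hst : PySem.Chars.find rest ts ≠ -1 ∧
        (PySem.Chars.find rest te = -1 ∨ PySem.Chars.find rest ts ≤ PySem.Chars.find rest te)
    · -- tag_start is the nearest tag
      rw [if_pos hst]
      obtain ⟨hpsne, hor⟩ := hst
      obtain ⟨hge, hpref, hno, hfit⟩ := pvFind_some hts hpsne
      set j := (PySem.Chars.find rest ts).toNat with hjdef
      have hnoTe : ∀ i < j, ¬ te <+: rest.drop i := by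
        rcases hor with h1 | h2
        · intro i _; exact pvFind_none h1 i
        · have hpene : PySem.Chars.find rest te ≠ -1 := by omega
          obtain ⟨-, -, hnoe, -⟩ := pvFind_some hte hpene
          intro i hi
          exact hnoe i (lt_of_lt_of_le hi (Int.toNat_le_toNat h2))
      have hrl' : (rest.drop (j + ts.length)).length = rest.length - (j + ts.length) :=
        List.length_drop ..
      obtain ⟨fa1, hfa1, hfa1'⟩ : ∃ m, fa = j + (m + 1) ∧ (rest.drop (j + ts.length)).length ≤ m :=
        ⟨fa - j - 1, by omega, by omega⟩
      rw [hfa1, pvChars ts te j rest clean (fa1 + 1) spans cur (by omega) hno hnoTe]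
      obtain ⟨c, rd, hcd⟩ := List.exists_cons_of_ne_nil (show rest.drop j ≠ [] by
        intro h0; rw [h0] at hpref; exact hts (List.prefix_nil.mp hpref))
      have hsw : PySem.Chars.startswith (c :: rd) ts = true :=
        (PySem.Chars.startswith_iff _ _).mpr (hcd ▸ hpref)
      rw [hcd]
      simp only [pvLoopA, hsw, if_pos]
      have hdd : (c :: rd).drop ts.length = rest.drop (j + ts.length) := by
        rw [← hcd, List.drop_drop]
      rw [hdd]
      have hclean' : (((clean ++ rest.take j).length : Nat) : Int) = (clean.length : Int) + (j : Int) := by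
        have : (rest.take j).length = j := by simp [List.length_take]; omega
        push_cast [List.length_append, this]; ring
      have hminI : min (j : Int) (rest.length : Int) = (j : Int) := by omega
      have hfl' : (chunks ++ [rest.take j]).flatten = clean ++ rest.take j := by simp [hfl]
      have hlen' : (rest.drop (j + ts.length)).length ≤ n := by omega
      have hfb'' : (rest.drop (j + ts.length)).length ≤ fb' := by omega
      cases cur with
      | none =>
        have hokA : pvOk (((clean ++ rest.take j).length : Int))
            spans (some (((clean ++ rest.take j).length : Int))) := by
          refine ⟨?_, le_refl _⟩
          have := hok.1
          simp only [Option.getD] at this ⊢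
          exact pvChain_mono this (by rw [hclean']; omega)
        have := ih (rest.drop (j + ts.length)) hlen' fa1 fb' (clean ++ rest.take j)
          (chunks ++ [rest.take j]) spans (some (((clean ++ rest.take j).length : Int)))
          hfa1' hfb'' hfl' hokA
        simpa [hclean', hminI] using this
      | some a =>
        have hokA : pvOk (((clean ++ rest.take j).length : Int)) spans (some a) :=
          pvOk_mono hok (by rw [hclean']; omega)
        have := ih (rest.drop (j + ts.length)) hlen' fa1 fb' (clean ++ rest.take j)
          (chunks ++ [rest.take j]) spans (some a) hfa1' hfb'' hfl' hokA
        simpa [hclean', hminI] using this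
    · -- tag_end is the nearest tag
      rw [if_neg hst]
      have hpene : PySem.Chars.find rest te ≠ -1 := by
        by_cases hps : PySem.Chars.find rest ts = -1
        · exact fun h => hboth ⟨hps, h⟩
        · exact fun h => hst ⟨hps, Or.inl h⟩
      obtain ⟨hgee, hprefe, hnoe, hfite⟩ := pvFind_some hte hpene
      set j := (PySem.Chars.find rest te).toNat with hjdef
      have hnoTs : ∀ i < j + 1, ¬ ts <+: rest.drop i := by
        by_cases hps : PySem.Chars.find rest ts = -1
        · intro i _; exact pvFind_none hps i
        · obtain ⟨hges, -, hnos, -⟩ := pvFind_some hts hps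
          have hlt : PySem.Chars.find rest te < PySem.Chars.find rest ts := by
            have := fun hle => hst ⟨hps, Or.inr hle⟩
            omega
          have : j < (PySem.Chars.find rest ts).toNat := by omega
          intro i hi
          exact hnos i (by omega)
      have hrl' : (rest.drop (j + te.length)).length = rest.length - (j + te.length) :=
        List.length_drop ..
      obtain ⟨fa1, hfa1, hfa1'⟩ : ∃ m, fa = j + (m + 1) ∧ (rest.drop (j + te.length)).length ≤ m :=
        ⟨fa - j - 1, by omega, by omega⟩
      rw [hfa1, pvChars ts te j rest clean (fa1 + 1) spans cur (by omega)
        (fun i hi => hnoTs i (by omega)) (fun i hi => hnoe i hi)]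
      obtain ⟨c, rd, hcd⟩ := List.exists_cons_of_ne_nil (show rest.drop j ≠ [] by
        intro h0; rw [h0] at hprefe; exact hte (List.prefix_nil.mp hprefe))
      have hswt : ¬ PySem.Chars.startswith (c :: rd) ts = true := by
        rw [PySem.Chars.startswith_iff, ← hcd]
        exact hnoTs j (by omega)
      have hswe : PySem.Chars.startswith (c :: rd) te = true :=
        (PySem.Chars.startswith_iff _ _).mpr (hcd ▸ hprefe)
      rw [hcd]
      simp only [pvLoopA, hswt, hswe, if_pos, Bool.false_eq_true, if_false]
      have hdd : (c :: rd).drop te.length = rest.drop (j + te.length) := by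
        rw [← hcd, List.drop_drop]
      rw [hdd]
      have hclean' : (((clean ++ rest.take j).length : Nat) : Int) = (clean.length : Int) + (j : Int) := by
        have : (rest.take j).length = j := by simp [List.length_take]; omega
        push_cast [List.length_append, this]; ring
      have hminI : min (j : Int) (rest.length : Int) = (j : Int) := by omega
      have hfl' : (chunks ++ [rest.take j]).flatten = clean ++ rest.take j := by simp [hfl]
      have hlen' : (rest.drop (j + te.length)).length ≤ n := by omega
      have hfb'' : (rest.drop (j + te.length)).length ≤ fb' := by omega
      cases cur with
      | none =>
        have hokA : pvOk (((clean ++ rest.take j).length : Int)) spans none :=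
          pvOk_mono hok (by rw [hclean']; omega)
        have := ih (rest.drop (j + te.length)) hlen' fa1 fb' (clean ++ rest.take j)
          (chunks ++ [rest.take j]) spans none hfa1' hfb'' hfl' hokA
        simpa [hclean', hminI] using this
      | some a =>
        have hchain : pvChain 0 (spans ++ [(a, ((clean ++ rest.take j).length : Int))])
            (((clean ++ rest.take j).length : Int)) := by
          refine pvChain_concat ?_ ?_
          · simpa [Option.getD] using hok.1
          · have : a ≤ (clean.length : Int) := by simpa [Option.getD] using hok.2
            rw [hclean']; omega
        have hokA : pvOk (((clean ++ rest.take j).length : Int))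
            (spans ++ [(a, ((clean ++ rest.take j).length : Int))]) none :=
          ⟨by simpa [Option.getD] using hchain, le_refl _⟩
        have := ih (rest.drop (j + te.length)) hlen' fa1 fb' (clean ++ rest.take j)
          (chunks ++ [rest.take j]) (spans ++ [(a, ((clean ++ rest.take j).length : Int))]) none
          hfa1' hfb'' hfl' hokA
        rw [pvEmitFold_concat] at this
        simpa [hclean', hminI] using this

lemma pvJoinNil (css : List (List Char)) : PySem.Chars.join [] css = css.flatten := by
  simp [PySem.Chars.join, List.intercalate]
  induction css with
  | nil => rfl
  | cons c cs ih => cases cs <;> simp_all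

-- ===== VERDICT (by name: the statement is the Claim_ definition above) =====
theorem shadow_to_clean_and_spans_spec : Claim_equal_shadow_to_clean_and_spans := by
  intro shadow tag_start tag_end hdom hpre
  unfold Spec_shadow_to_clean_and_spans
  by_cases hguard : tag_start.toList = [] ∨ tag_end.toList = []
  · have hsh : shadow.toList = [] := by
      rcases hpre with h | ⟨h1, h2⟩
      · exact h
      · tauto
    have hsh' : shadow = "" := String.toList_eq_nil_iff.mp hsh
    simp only [shadow_to_clean_and_spans, shadow_to_clean_and_spans_alt, hsh, if_pos hguard]
    rw [pvLoopA_nil]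
    simp [pvMergeSpans, hsh']
  · push_neg at hguard
    obtain ⟨h1, h2⟩ := hguard
    obtain ⟨hc, hl, hsp, hcur, hokF⟩ := pvSim tag_start.toList tag_end.toList h1 h2
      shadow.toList.length shadow.toList le_rfl (shadow.toList.length + 1)
      (shadow.toList.length + 1) [] [] [] none (by omega) (by omega) rfl
      ⟨by simp [pvChain, Option.getD], by simp [Option.getD]⟩
    simp only [List.length_nil, Nat.cast_zero] at hc hl hsp hcur
    simp only [shadow_to_clean_and_spans, shadow_to_clean_and_spans_alt,
      if_neg (show ¬ (tag_start.toList = [] ∨ tag_end.toList = []) by tauto)]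
    have hemit0 : pvEmitFold ([] : List (Int × Int)) = [] := rfl
    rw [hemit0] at hc hl hsp hcur
    cases hcurA : (pvLoopA tag_start.toList tag_end.toList (shadow.toList.length + 1)
        shadow.toList [] [] none).2.2 with
    | none =>
      rw [hcurA] at hcur hokF
      refine Prod.ext ?_ ?_
      · simp only
        rw [pvJoinNil, hc]
      · simp only [hcur, hsp]
        exact pvMerge_eq_emitFold (by simpa [Option.getD] using hokF.1)
    | some a =>
      rw [hcurA] at hcur hokF
      refine Prod.ext ?_ ?_
      · simp only
        rw [pvJoinNil, hc]
      · simp only [hcur, hsp, hl]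
        have hchain : pvChain 0
            ((pvLoopA tag_start.toList tag_end.toList (shadow.toList.length + 1) shadow.toList [] [] none).2.1
              ++ [(a, (((pvLoopA tag_start.toList tag_end.toList (shadow.toList.length + 1) shadow.toList [] [] none).1.length : Nat) : Int))])
            (((pvLoopA tag_start.toList tag_end.toList (shadow.toList.length + 1) shadow.toList [] [] none).1.length : Nat) : Int) := by
          refine pvChain_concat ?_ ?_
          · simpa [Option.getD] using hokF.1
          · simpa [Option.getD] using hokF.2
        rw [pvMerge_eq_emitFold hchain, pvEmitFold_concat]
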